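-- pv_equiv track=rewrite | github.com/rubelw/OSSS | src/OSSS/ai/agents/query_data/handlers/votes_handler.py | _preferred_field_order
-- ===== SOURCE A (Python) =====
-- from typing import Any, Dict, List
--
-- def _preferred_field_order(fields: List[str]) -> List[str]:
--     """
--     Prefer a stable, human-friendly order if those fields exist.
--     Anything not listed is appended at the end in original order.
--     """
--     preferred = [
--         "id",
--         "user_id",
--         "proposal_id",
--         "issue_id",
--         "ballot_id",
--         "choice",
--         "value",
--         "created_at",
--         "updated_at",
--     ]
--
--     ordered = [f for f in preferred if f in fields]
--     for f in fields:
--         if f not in ordered: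
--             ordered.append(f)
--
--     return ordered
-- ===== SOURCE B (Python) =====
-- from typing import List
--
-- def _preferred_field_order(fields: List[str]) -> List[str]:
--     """
--     Prefer a stable, human-friendly order if those fields exist.
--     Anything not listed is appended at the end in original order.
--     Bucket-distribution strategy: one pass over `fields` with a seen-set
--     dedup, dropping each new field into the bucket of its priority, then
--     concatenate the buckets.
--     """
--     preferred = [
--         "id",
--         "user_id",
--         "proposal_id",
--         "issue_id",
--         "ballot_id",
--         "choice",
--         "value",
--         "created_at",
--         "updated_at",
--     ]
--     priority = {f: i for i, f in enumerate(preferred)}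
--     n = len(preferred)
--     buckets = [[] for _ in range(n + 1)]
--     seen = set()
--     for f in fields:
--         if f not in seen:
--             seen.add(f)
--             buckets[priority.get(f, n)].append(f)
--     return [f for b in buckets for f in b]
-- ===== Notes on version B (the rewrite author's own statement) =====
-- stated objective: faster
-- what changed: Replaces A's filter-then-rescan (membership tests against the growing output list) with a one-pass bucket distribution: a priority index built once, a seen-set dedup, and per-priority buckets concatenated at the end.
import Mathlib
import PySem

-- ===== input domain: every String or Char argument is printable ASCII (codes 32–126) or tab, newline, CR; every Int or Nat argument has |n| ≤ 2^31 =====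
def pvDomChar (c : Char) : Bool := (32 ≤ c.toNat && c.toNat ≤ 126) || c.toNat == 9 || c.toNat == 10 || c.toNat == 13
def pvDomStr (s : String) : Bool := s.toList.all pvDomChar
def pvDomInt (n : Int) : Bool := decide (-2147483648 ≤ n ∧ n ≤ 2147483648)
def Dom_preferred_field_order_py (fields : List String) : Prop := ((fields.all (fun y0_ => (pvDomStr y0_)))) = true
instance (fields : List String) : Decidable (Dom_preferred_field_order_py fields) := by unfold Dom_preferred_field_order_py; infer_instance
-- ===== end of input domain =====

-- B replaces A's filter-then-rescan with a single pass: a seen-set dedup that drops each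
-- first occurrence into its priority bucket, with the buckets concatenated at the end.


-- the literal list `preferred`, shared by both Pythons
def preferredList : List String :=
  ["id", "user_id", "proposal_id", "issue_id", "ballot_id",
   "choice", "value", "created_at", "updated_at"]

-- ===== PORT A =====
def preferred_field_order_py (fields : List String) : List String :=
  -- ordered = [f for f in preferred if f in fields]
  let ordered := preferredList.filter (fun f => decide (f ∈ fields))
  -- for f in fields: if f not in ordered: ordered.append(f)
  fields.foldl (fun acc f => if f ∈ acc then acc else acc ++ [f]) ordered

-- ===== PORT B =====
-- priority = {f: i for i, f in enumerate(preferred)}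
def prioDict : PySem.Dict String Int :=
  (PySem.List.enumerate preferredList 0).foldl (fun d p => d.insert p.2 p.1) PySem.Dict.empty

def preferred_field_order_py_alt (fields : List String) : List String :=
  let n : Int := (preferredList.length : Int)
  -- buckets = [[] for _ in range(n + 1)]
  let buckets0 : List (List String) := (PySem.List.pyRange 0 (n + 1) 1).map (fun _ => [])
  -- for f in fields: if f not in seen: seen.add(f); buckets[priority.get(f, n)].append(f)
  let st := fields.foldl
    (fun (st : PySem.Set String × List (List String)) f =>
      if f ∈ st.1 then st
      else
        -- the bucket index priority.get(f, n) is one of 0..9 here, so .toNat is exact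
        let k : Nat := (prioDict.getD f n).toNat
        (st.1.add f, st.2.set k ((st.2.getD k []) ++ [f])))
    (PySem.Set.ofList [], buckets0)
  -- return [f for b in buckets for f in b]
  st.2.flatten

-- ===== PRECONDITION & SPEC =====
def Spec_preferred_field_order_py (fields : List String) (out : List String) : Prop := out = preferred_field_order_py_alt fields
instance (fields : List String) (out : List String) : Decidable (Spec_preferred_field_order_py fields out) := by unfold Spec_preferred_field_order_py; infer_instance

-- ===== CLAIM (what is proved, stated in full; the proofs are below) =====
def Claim_equal_preferred_field_order_py : Prop := ∀ (fields : List String), Dom_preferred_field_order_py fields → Spec_preferred_field_order_py fields (preferred_field_order_py fields)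

-- ===== LEMMAS AND PROOFS =====

-- the bucket index B computes for a field f
def pri (f : String) : Nat := (prioDict.getD f ((preferredList.length : Int))).toNat

-- the bucket list after the fields of l have been processed
def bk (l : List String) : List (List String) :=
  (List.range 10).map (fun i => (PySem.List.dedup l).filter (fun f => decide (pri f = i)))

theorem hpri (f : String) : pri f =
    if f = "updated_at" then 8 else if f = "created_at" then 7 else if f = "value" then 6
    else if f = "choice" then 5 else if f = "ballot_id" then 4 else if f = "issue_id" then 3
    else if f = "proposal_id" then 2 else if f = "user_id" then 1 else if f = "id" then 0
    else 9 := by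
  have h : prioDict =
      ((((((((PySem.Dict.empty.insert "id" (0:Int)).insert "user_id" 1).insert "proposal_id" 2).insert
        "issue_id" 3).insert "ballot_id" 4).insert "choice" 5).insert "value" 6).insert
        "created_at" 7).insert "updated_at" 8 := by rfl
  simp only [pri, h, PySem.Dict.getD_insert]
  split_ifs <;> simp [PySem.Dict.getD, PySem.Dict.get?, PySem.Dict.empty, preferredList]

theorem pri_lt10 (f : String) : pri f < 10 := by
  rw [hpri]; split_ifs <;> omega

theorem pri_cases (y : String) :
    (pri y = 0 ↔ y = "id") ∧ (pri y = 1 ↔ y = "user_id") ∧ (pri y = 2 ↔ y = "proposal_id") ∧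
    (pri y = 3 ↔ y = "issue_id") ∧ (pri y = 4 ↔ y = "ballot_id") ∧ (pri y = 5 ↔ y = "choice") ∧
    (pri y = 6 ↔ y = "value") ∧ (pri y = 7 ↔ y = "created_at") ∧ (pri y = 8 ↔ y = "updated_at") ∧
    (pri y = 9 ↔ y ∉ preferredList) := by
  rw [hpri]; split_ifs <;> simp_all [preferredList]

theorem dedup_snoc (l : List String) (f : String) :
    PySem.List.dedup (l ++ [f]) = PySem.List.dedup l ++ (if f ∈ l then [] else [f]) := by
  rw [show PySem.List.dedup (l ++ [f]) = (PySem.Set.ofList l).add f by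
        simp [PySem.List.dedup, PySem.Set.ofList, List.foldl_append]]
  rw [PySem.Set.add,
    show (PySem.Set.ofList l).contains f = decide (f ∈ l) by
      simp [PySem.Set.mem_ofList]]
  by_cases h : f ∈ l <;> simp [h]

-- A's loop appends exactly the non-preferred first occurrences after the preferred block
theorem A_loop (F : List String) : ∀ (r l : List String), (∀ f ∈ r, f ∈ F) →
    r.foldl (fun acc f => if f ∈ acc then acc else acc ++ [f])
      (preferredList.filter (fun f => decide (f ∈ F)) ++
        (PySem.List.dedup l).filter (fun f => !decide (f ∈ preferredList)))
    = preferredList.filter (fun f => decide (f ∈ F)) ++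
        (PySem.List.dedup (l ++ r)).filter (fun f => !decide (f ∈ preferredList)) := by
  intro r
  induction r with
  | nil => intro l _; simp
  | cons f r' ih =>
    intro l hr
    have hfF : f ∈ F := hr f (List.mem_cons_self)
    have hmem : (f ∈ preferredList.filter (fun f => decide (f ∈ F)) ++
        (PySem.List.dedup l).filter (fun f => !decide (f ∈ preferredList)))
        ↔ (f ∈ preferredList ∨ f ∈ l) := by
      simp [List.mem_filter, PySem.Set.mem_ofList, hfF]
      tauto
    have hstep : ∀ acc acc', acc = acc' → (f :: r').foldl
        (fun acc f => if f ∈ acc then acc else acc ++ [f]) acc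
        = r'.foldl (fun acc f => if f ∈ acc then acc else acc ++ [f])
            (if f ∈ acc' then acc' else acc' ++ [f]) := by
      intro acc acc' h; subst h; rfl
    have hr' : ∀ g ∈ r', g ∈ F := fun g hg => hr g (List.mem_cons_of_mem _ hg)
    have key : l ++ f :: r' = (l ++ [f]) ++ r' := by simp
    rw [key]
    by_cases hc : f ∈ preferredList ∨ f ∈ l
    · rw [hstep _ _ rfl, if_pos (hmem.mpr hc)]
      have : (PySem.List.dedup (l ++ [f])).filter (fun f => !decide (f ∈ preferredList))
          = (PySem.List.dedup l).filter (fun f => !decide (f ∈ preferredList)) := by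
        rw [dedup_snoc]
        rcases hc with h | h
        · by_cases h2 : f ∈ l <;> simp [h2, List.filter_append, h]
        · simp [h]
      rw [← this]
      exact ih (l ++ [f]) hr'
    · push Not at hc
      rw [hstep _ _ rfl, if_neg (fun h => (hmem.mp h).elim hc.1 hc.2)]
      have : (preferredList.filter (fun f => decide (f ∈ F)) ++
            (PySem.List.dedup l).filter (fun f => !decide (f ∈ preferredList))) ++ [f]
          = preferredList.filter (fun f => decide (f ∈ F)) ++
            (PySem.List.dedup (l ++ [f])).filter (fun f => !decide (f ∈ preferredList)) := by
        rw [dedup_snoc]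
        simp [hc.2, List.filter_append, hc.1]
      rw [this]
      exact ih (l ++ [f]) hr'

theorem set_map_range {β : Type} (g : Nat → β) (n k : Nat) (v : β) :
    ((List.range n).map g).set k v = (List.range n).map (fun i => if i = k then v else g i) := by
  apply List.ext_getElem <;> simp
  intro i hi
  by_cases h : i = k
  · simp [h]
  · simp [List.getElem_set, h]
    exact fun h' => absurd h'.symm h

-- B's loop maintains (seen set, buckets) as (set of l, bk l)
theorem B_loop : ∀ (r l : List String),
    r.foldl (fun (st : PySem.Set String × List (List String)) f =>
        if f ∈ st.1 then st
        else
          let k : Nat := (prioDict.getD f ((preferredList.length : Int))).toNat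
          (st.1.add f, st.2.set k ((st.2.getD k []) ++ [f])))
      (PySem.Set.ofList l, bk l)
    = (PySem.Set.ofList (l ++ r), bk (l ++ r)) := by
  intro r
  induction r with
  | nil => intro l; simp
  | cons f r' ih =>
    intro l
    rw [List.foldl_cons, show l ++ f :: r' = (l ++ [f]) ++ r' by simp]
    by_cases h : f ∈ l
    · rw [if_pos (by simpa [PySem.Set.mem_ofList] using h)]
      have h1 : PySem.Set.ofList (l ++ [f]) = PySem.Set.ofList l := by
        have := dedup_snoc l f
        simpa [PySem.List.dedup, h] using this
      have h2 : bk (l ++ [f]) = bk l := by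
        unfold bk
        rw [show PySem.List.dedup (l ++ [f]) = PySem.List.dedup l by
          simpa [h] using dedup_snoc l f]
      rw [← h1, ← h2]; exact ih (l ++ [f])
    · rw [if_neg (by simpa [PySem.Set.mem_ofList] using h)]
      have h1 : (PySem.Set.ofList l).add f = PySem.Set.ofList (l ++ [f]) := by
        have := dedup_snoc l f
        simp only [PySem.List.dedup] at this
        rw [this, if_neg h, PySem.Set.add,
          show (PySem.Set.ofList l).contains f = decide (f ∈ l) by simp [PySem.Set.mem_ofList],
          decide_eq_false h]
        simp
      have hgd : (bk l).getD (pri f) [] =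
          (PySem.List.dedup l).filter (fun g => decide (pri g = pri f)) := by
        unfold bk
        exact PySem.List.getD_map_range _ 10 (pri f) [] (pri_lt10 f)
      have h2 : (bk l).set (pri f) ((bk l).getD (pri f) [] ++ [f]) = bk (l ++ [f]) := by
        rw [hgd]
        unfold bk
        rw [set_map_range]
        apply List.map_congr_left
        intro i hi
        rw [show PySem.List.dedup (l ++ [f]) = PySem.List.dedup l ++ [f] by
          simpa [h] using dedup_snoc l f]
        rw [List.filter_append]
        by_cases hik : i = pri f
        · simp [hik]
        · have hik' : ¬ pri f = i := fun h' => hik h'.symm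
          simp [hik, hik']
      have hst : (let k := (prioDict.getD f ((preferredList.length : Int))).toNat
            ((PySem.Set.ofList l, bk l).1.add f,
              (PySem.Set.ofList l, bk l).2.set k ((PySem.Set.ofList l, bk l).2.getD k [] ++ [f])))
          = (PySem.Set.ofList (l ++ [f]), bk (l ++ [f])) := by
        show ((PySem.Set.ofList l).add f, (bk l).set (pri f) ((bk l).getD (pri f) [] ++ [f])) = _
        rw [h1, h2]
      rw [hst]
      exact ih (l ++ [f])

-- in a duplicate-free list a predicate that only x satisfies filters to at most [x]
theorem filter_single (p : String → Bool) (x : String) :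
    ∀ D : List String, D.Nodup → (∀ y, p y = true ↔ y = x) →
      D.filter p = if x ∈ D then [x] else [] := by
  intro D
  induction D with
  | nil => simp
  | cons a D' ih =>
    intro hnd hp
    rcases List.nodup_cons.mp hnd with ⟨ha, hnd'⟩
    by_cases hpa : p a
    · have hax : a = x := (hp a).mp hpa
      subst hax
      have : D'.filter p = [] := by
        rw [List.filter_eq_nil_iff]
        intro y hy hpy
        exact ha (((hp y).mp hpy) ▸ hy)
      simp [hpa, this]
    · have hne : x ≠ a := fun h => hpa ((hp a).mpr h.symm)
      rw [List.filter_cons_of_neg (by simpa using hpa), ih hnd' hp]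
      simp [hne]

set_option maxHeartbeats 1000000 in
theorem main_eq (F : List String) : preferred_field_order_py F = preferred_field_order_py_alt F := by
  have hA : preferred_field_order_py F
      = preferredList.filter (fun f => decide (f ∈ F)) ++
        (PySem.List.dedup F).filter (fun f => !decide (f ∈ preferredList)) := by
    unfold preferred_field_order_py
    have := A_loop F F [] (fun _ h => h)
    simpa [PySem.List.dedup, PySem.Set.ofList] using this
  have hbk0 : ((PySem.List.pyRange 0 (((preferredList.length : Int)) + 1) 1).map
      (fun _ => ([] : List String))) = bk [] := by decide
  have hB : preferred_field_order_py_alt F = (bk F).flatten := by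
    show (F.foldl
      (fun (st : PySem.Set String × List (List String)) f =>
        if f ∈ st.1 then st
        else
          let k : Nat := (prioDict.getD f ((preferredList.length : Int))).toNat
          (st.1.add f, st.2.set k ((st.2.getD k []) ++ [f])))
      (PySem.Set.ofList [],
        (PySem.List.pyRange 0 (((preferredList.length : Int)) + 1) 1).map
          (fun _ => ([] : List String)))).2.flatten = (bk F).flatten
    rw [hbk0]
    have := B_loop F []
    simp only [List.nil_append] at this
    rw [this]
  rw [hA, hB]
  have hnd : (PySem.List.dedup F).Nodup := by
    simp only [PySem.List.dedup_eq_ofList]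
    exact PySem.Set.nodup_ofList F
  have hsingle : ∀ (i : Nat) (x : String), (∀ y, pri y = i ↔ y = x) →
      (PySem.List.dedup F).filter (fun f => decide (pri f = i))
        = if x ∈ F then [x] else [] := by
    intro i x hx
    rw [filter_single _ x _ hnd (by intro y; simpa using hx y)]
    simp
  have h0 := hsingle 0 "id" (fun y => (pri_cases y).1)
  have h1 := hsingle 1 "user_id" (fun y => (pri_cases y).2.1)
  have h2 := hsingle 2 "proposal_id" (fun y => (pri_cases y).2.2.1)
  have h3 := hsingle 3 "issue_id" (fun y => (pri_cases y).2.2.2.1)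
  have h4 := hsingle 4 "ballot_id" (fun y => (pri_cases y).2.2.2.2.1)
  have h5 := hsingle 5 "choice" (fun y => (pri_cases y).2.2.2.2.2.1)
  have h6 := hsingle 6 "value" (fun y => (pri_cases y).2.2.2.2.2.2.1)
  have h7 := hsingle 7 "created_at" (fun y => (pri_cases y).2.2.2.2.2.2.2.1)
  have h8 := hsingle 8 "updated_at" (fun y => (pri_cases y).2.2.2.2.2.2.2.2.1)
  have h9 : (PySem.List.dedup F).filter (fun f => decide (pri f = 9))
      = (PySem.List.dedup F).filter (fun f => !decide (f ∈ preferredList)) := by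
    apply List.filter_congr
    intro y _
    have := (pri_cases y).2.2.2.2.2.2.2.2.2
    simp [this]
  simp only [bk, show List.range 10 = [0,1,2,3,4,5,6,7,8,9] from rfl,
    List.map_cons, List.map_nil, List.flatten, h0, h1, h2, h3, h4, h5, h6, h7, h8, h9]
  have hf : ∀ (q : String → Bool) (a : String) (l : List String),
      (a :: l).filter q = (if q a then [a] else []) ++ l.filter q := by
    intro q a l; by_cases h : q a <;> simp [h]
  simp only [preferredList, hf, List.filter_nil, List.append_nil, List.append_assoc,
    decide_eq_true_eq]
  simp

-- ===== VERDICT (by name: the statement is the Claim_ definition above) =====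
theorem preferred_field_order_py_spec : Claim_equal_preferred_field_order_py := by
  intro fields _
  unfold Spec_preferred_field_order_py
  exact main_eq fields
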